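-- pv_equiv track=rewrite | github.com/ersilia-os/ersilia | ersilia/utils/identifiers/text.py | _is_inchikey
-- ===== SOURCE A (Python) =====
-- def _is_inchikey(text):
--     if len(text) != 27:
--         return False
--     comp = text.split("-")
--     if len(comp) != 3:
--         return False
--     if len(comp[0]) != 14 or len(comp[1]) != 10 or len(comp[2]) != 1:
--         return False
--     for c in comp:
--         for x in c:
--             if not x.isalpha():
--                 return False
--     return True
-- ===== SOURCE B (Python) =====
-- def _is_inchikey(text):
--     if len(text) != 27:
--         return False
--     if text[14] != "-" or text[25] != "-":
--         return False
--     return all(text[i].isalpha() for i in range(27) if i != 14 and i != 25)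
-- ===== Notes on version B (the rewrite author's own statement) =====
-- stated objective: simpler
-- what changed: B replaces A's dash-split plus nested loops over the three components with a direct positional check: length 27, dashes fixed at indices 14 and 25, and one pass verifying every other character is alphabetic.
import Mathlib
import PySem

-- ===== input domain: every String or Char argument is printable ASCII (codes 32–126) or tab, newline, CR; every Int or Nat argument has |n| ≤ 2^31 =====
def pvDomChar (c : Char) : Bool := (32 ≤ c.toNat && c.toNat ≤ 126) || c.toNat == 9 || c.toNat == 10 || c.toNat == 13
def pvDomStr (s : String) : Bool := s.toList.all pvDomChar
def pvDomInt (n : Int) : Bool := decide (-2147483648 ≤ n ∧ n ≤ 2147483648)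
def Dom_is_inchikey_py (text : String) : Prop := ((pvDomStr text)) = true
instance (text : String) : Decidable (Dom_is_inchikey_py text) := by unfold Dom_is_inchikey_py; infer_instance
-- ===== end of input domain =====

-- B checks the two dashes at their fixed positions and makes one indexed pass over the
-- other characters, instead of A's split on '-' plus nested loops over the three parts.

-- ===== PORT A =====
-- len(text) != 27 / text.split("-") / component-length checks / nested all-alpha loops
def is_inchikey_py (text : String) : Bool :=
  if PySem.Str.len text ≠ 27 then false
  else
    let comp := PySem.Chars.splitOn text.toList ['-']
    if comp.length ≠ 3 then false
    else if (comp.getD 0 []).length ≠ 14 ∨ (comp.getD 1 []).length ≠ 10 ∨ (comp.getD 2 []).length ≠ 1 then false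
    else comp.all (fun c => c.all (fun x => PySem.Chars.isalpha x))


-- ===== PORT B =====
-- length check, dashes at fixed indices 14 and 25, one pass over the remaining indices
def is_inchikey_py_alt (text : String) : Bool :=
  let cs := text.toList
  if cs.length ≠ 27 then false
  else if ¬ (PySem.List.pyGet? cs 14 = some '-' ∧ PySem.List.pyGet? cs 25 = some '-') then false
  else ((PySem.List.pyRange 0 27 1).filter (fun i => i ≠ 14 ∧ i ≠ 25)).all
        (fun i => PySem.Chars.isalpha (PySem.List.pyGetD cs i ' '))

-- ===== PRECONDITION & SPEC =====
def Spec_is_inchikey_py (text : String) (out : Bool) : Prop := out = is_inchikey_py_alt text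
instance (text : String) (out : Bool) : Decidable (Spec_is_inchikey_py text out) := by unfold Spec_is_inchikey_py; infer_instance

-- ===== CLAIM (what is proved, stated in full; the proofs are below) =====
def Claim_equal_is_inchikey_py : Prop := ∀ (text : String), Dom_is_inchikey_py text → Spec_is_inchikey_py text (is_inchikey_py text)

-- ===== LEMMAS AND PROOFS =====

def pvPieces (cs : List Char) : List (List Char) :=
  match cs with
  | [] => [[]]
  | c :: r => if c = '-' then [] :: pvPieces r else (pvPieces r).modifyHead (c :: ·)

lemma pvSplitOn_go_eq (cs : List Char) : ∀ (cur : List Char) (acc : List (List Char)) (fuel : Nat),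
    cs.length < fuel →
    PySem.Chars.splitOn.go ['-'] fuel cs cur acc
      = acc.reverse ++ (pvPieces cs).modifyHead (cur.reverse ++ ·) := by
  induction cs with
  | nil =>
    intro cur acc fuel h
    match fuel, h with
    | fuel+1, _ => simp [PySem.Chars.splitOn.go, pvPieces]
  | cons c r ih =>
    intro cur acc fuel h
    match fuel, h with
    | fuel+1, h =>
      rw [PySem.Chars.splitOn.go]
      by_cases hc : c = '-'
      · subst hc
        simp only [List.isPrefixOf, BEq.rfl, Bool.true_and, if_pos]
        simp only [List.length_cons, List.drop_succ_cons, List.drop_zero, List.length_nil]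
        rw [ih [] (cur.reverse :: acc) fuel (by simpa using h)]
        simp [pvPieces, List.modifyHead]
        cases pvPieces r <;> rfl
      · have : (['-'].isPrefixOf (c :: r)) = false := by
          simp [List.isPrefixOf]
          exact fun hh => hc hh.symm
        rw [this]
        simp only [Bool.false_eq_true, if_false]
        rw [ih (c :: cur) acc fuel (by simpa using h)]
        simp only [pvPieces, if_neg hc]
        cases hp : pvPieces r with
        | nil => simp [List.modifyHead]
        | cons a t => simp [List.modifyHead]

lemma pvSplitOn_eq (cs : List Char) :
    PySem.Chars.splitOn cs ['-'] = pvPieces cs := by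
  rw [PySem.Chars.splitOn, pvSplitOn_go_eq cs [] [] (cs.length+1) (by omega)]
  cases hp : pvPieces cs <;> simp [List.modifyHead]

lemma pvPieces_ne_nil (cs : List Char) : pvPieces cs ≠ [] := by
  cases cs with
  | nil => simp [pvPieces]
  | cons c r =>
    simp only [pvPieces]
    split
    · simp
    · cases h : pvPieces r with
      | nil => exact absurd h (pvPieces_ne_nil r)
      | cons a t => simp [List.modifyHead]

def pvJoin : List (List Char) → List Char
  | [] => []
  | [x] => x
  | x :: y :: xs => x ++ '-' :: pvJoin (y :: xs)

lemma pvJoin_pieces (cs : List Char) : pvJoin (pvPieces cs) = cs := by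
  induction cs with
  | nil => rfl
  | cons c r ih =>
    simp only [pvPieces]
    obtain ⟨a, t, hp⟩ : ∃ a t, pvPieces r = a :: t := by
      cases h : pvPieces r with
      | nil => exact absurd h (pvPieces_ne_nil r)
      | cons a t => exact ⟨a, t, rfl⟩
    rw [hp] at ih
    by_cases hc : c = '-'
    · subst hc
      rw [if_pos rfl, hp]
      simpa [pvJoin] using ih
    · rw [if_neg hc, hp]
      cases t with
      | nil => simpa [pvJoin, List.modifyHead] using congrArg (c :: ·) ih
      | cons b u => simpa [pvJoin, List.modifyHead] using congrArg (c :: ·) ih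

lemma pvPieces_no_sep (a : List Char) (h : ('-' : Char) ∉ a) : pvPieces a = [a] := by
  induction a with
  | nil => rfl
  | cons c r ih =>
    simp only [List.mem_cons, not_or] at h
    have hc : c ≠ '-' := fun hh => h.1 hh.symm
    simp [pvPieces, hc, ih h.2, List.modifyHead]

lemma pvPieces_append (a r : List Char) (h : ('-' : Char) ∉ a) :
    pvPieces (a ++ '-' :: r) = a :: pvPieces r := by
  induction a with
  | nil => simp [pvPieces]
  | cons c b ih =>
    simp only [List.mem_cons, not_or] at h
    have hc : c ≠ '-' := fun hh => h.1 hh.symm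
    simp [pvPieces, hc, ih h.2, List.modifyHead]

def pvGood (cs : List Char) : Prop :=
  cs.length = 27 ∧ cs.getD 14 ' ' = '-' ∧ cs.getD 25 ' ' = '-' ∧
  ∀ i, i < 27 → i ≠ 14 → i ≠ 25 → PySem.Chars.isalpha (cs.getD i ' ') = true

lemma pvGood_of_decomp (p0 p1 p2 : List Char) (h0 : p0.length = 14) (h1 : p1.length = 10)
    (h2 : p2.length = 1)
    (ha0 : ∀ x ∈ p0, PySem.Chars.isalpha x = true) (ha1 : ∀ x ∈ p1, PySem.Chars.isalpha x = true)
    (ha2 : ∀ x ∈ p2, PySem.Chars.isalpha x = true) :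
    pvGood (p0 ++ '-' :: (p1 ++ '-' :: p2)) := by
  have hlen : (p0 ++ '-' :: (p1 ++ '-' :: p2)).length = 27 := by simp [h0, h1, h2]
  refine ⟨hlen, ?_, ?_, ?_⟩
  · rw [List.getD_append_right _ _ _ _ (by omega), h0]
    simp
  · rw [List.getD_append_right _ _ _ _ (by omega), h0]
    show ('-' :: (p1 ++ '-' :: p2)).getD 11 ' ' = '-'
    rw [List.getD_cons_succ, List.getD_append_right _ _ _ _ (by omega), h1]
    simp
  · intro i hi h14 h25
    rcases lt_or_ge i 14 with hlt | hge
    · rw [List.getD_append _ _ _ _ (by omega)]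
      rw [List.getD_eq_getElem _ _ (by omega)]
      exact ha0 _ (List.getElem_mem _)
    · rw [List.getD_append_right _ _ _ _ (by omega), h0]
      have : i - 14 = (i - 15) + 1 := by omega
      rw [this, List.getD_cons_succ]
      rcases lt_or_ge (i - 15) 10 with hlt2 | hge2
      · rw [List.getD_append _ _ _ _ (by omega)]
        rw [List.getD_eq_getElem _ _ (by omega)]
        exact ha1 _ (List.getElem_mem _)
      · rw [List.getD_append_right _ _ _ _ (by omega), h1]
        have : i - 15 - 10 = (i - 26) + 1 := by omega
        rw [this, List.getD_cons_succ]
        have : i - 26 = 0 := by omega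
        rw [this]
        rw [List.getD_eq_getElem _ _ (by omega)]
        exact ha2 _ (List.getElem_mem _)

lemma pvGood_decomp (cs : List Char) (hg : pvGood cs) :
    ∃ p0 p1 p2, cs = p0 ++ '-' :: (p1 ++ '-' :: p2) ∧ p0.length = 14 ∧ p1.length = 10 ∧
      p2.length = 1 ∧ (∀ x ∈ p0, PySem.Chars.isalpha x = true) ∧
      (∀ x ∈ p1, PySem.Chars.isalpha x = true) ∧ (∀ x ∈ p2, PySem.Chars.isalpha x = true) := by
  obtain ⟨hlen, h14, h25, halpha⟩ := hg
  refine ⟨cs.take 14, (cs.drop 15).take 10, cs.drop 26, ?_, ?_, ?_, ?_, ?_, ?_, ?_⟩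
  · have e0 : cs = cs.take 14 ++ cs.drop 14 := (List.take_append_drop 14 cs).symm
    have e1 : cs.drop 14 = cs[14] :: cs.drop 15 := List.drop_eq_getElem_cons (by omega)
    have e2 : cs.drop 15 = (cs.drop 15).take 10 ++ (cs.drop 15).drop 10 := (List.take_append_drop _ _).symm
    have e3 : (cs.drop 15).drop 10 = cs.drop 25 := by rw [List.drop_drop]
    have e4 : cs.drop 25 = cs[25] :: cs.drop 26 := List.drop_eq_getElem_cons (by omega)
    have g14 : cs[14] = '-' := by rw [← List.getD_eq_getElem cs ' ' (by omega)]; exact h14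
    have g25 : cs[25] = '-' := by rw [← List.getD_eq_getElem cs ' ' (by omega)]; exact h25
    conv_lhs => rw [e0, e1, e2, e3, e4, g14, g25]
  · simp [hlen]
  · simp [hlen]
  · simp [hlen]
  · intro x hx
    obtain ⟨i, hi, rfl⟩ := List.mem_iff_getElem.mp hx
    rw [List.getElem_take]
    have hi14 : i < 14 := by simpa [hlen] using hi
    rw [← List.getD_eq_getElem cs ' ' (by omega)]
    exact halpha i (by omega) (by omega) (by omega)
  · intro x hx
    obtain ⟨i, hi, rfl⟩ := List.mem_iff_getElem.mp hx
    rw [List.getElem_take, List.getElem_drop]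
    have hi10 : i < 10 := by simp [hlen] at hi; omega
    rw [← List.getD_eq_getElem cs ' ' (by omega)]
    exact halpha (15 + i) (by omega) (by omega) (by omega)
  · intro x hx
    obtain ⟨i, hi, rfl⟩ := List.mem_iff_getElem.mp hx
    rw [List.getElem_drop]
    have hi1 : i < 1 := by simpa [hlen] using hi
    rw [← List.getD_eq_getElem cs ' ' (by omega)]
    exact halpha (26 + i) (by omega) (by omega) (by omega)

lemma pvMemAlpha (p : List Char) (h : ∀ x ∈ p, PySem.Chars.isalpha x = true) : ('-' : Char) ∉ p := by
  intro hm
  exact absurd (h _ hm) (by decide)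

lemma pvA_iff (text : String) : is_inchikey_py text = true ↔ pvGood text.toList := by
  set cs := text.toList with hcs
  constructor
  · intro hA
    rw [is_inchikey_py] at hA
    split at hA
    · exact absurd hA (by simp)
    · rename_i hlen
      simp only [PySem.Str.len_eq, ← hcs, ne_eq, not_not] at hlen
      simp only [← hcs, pvSplitOn_eq] at hA
      split at hA
      · exact absurd hA (by simp)
      · rename_i h3
        simp only [ne_eq, not_not] at h3
        obtain ⟨p0, p1, p2, hp⟩ := List.length_eq_three.mp h3
        have hdec : cs = p0 ++ '-' :: (p1 ++ '-' :: p2) := by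
          conv_lhs => rw [← pvJoin_pieces cs, hp]
          simp [pvJoin]
        rw [hp] at hA
        split at hA
        · exact absurd hA (by simp)
        · rename_i hl
          simp only [List.getD, ne_eq, not_or, not_not] at hl
          obtain ⟨h0, h1, h2⟩ := hl
          simp only [List.all_cons, List.all_nil, Bool.and_true, Bool.and_eq_true,
            List.all_eq_true] at hA
          rw [hdec]
          exact pvGood_of_decomp p0 p1 p2 h0 h1 h2 hA.1 hA.2.1 hA.2.2
  · intro hg
    obtain ⟨p0, p1, p2, hdec, h0, h1, h2, ha0, ha1, ha2⟩ := pvGood_decomp cs hg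
    rw [is_inchikey_py]
    have hlen : cs.length = 27 := hg.1
    rw [if_neg (by simp [PySem.Str.len_eq, ← hcs, hlen])]
    have hpieces : PySem.Chars.splitOn cs ['-'] = [p0, p1, p2] := by
      rw [hdec, pvSplitOn_eq, pvPieces_append _ _ (pvMemAlpha _ ha0),
        pvPieces_append _ _ (pvMemAlpha _ ha1), pvPieces_no_sep _ (pvMemAlpha _ ha2)]
    simp only [← hcs, hpieces]
    show (if _ then _ else _) = true
    rw [if_neg (by simp)]
    rw [if_neg (by simp [h0, h1, h2])]
    simp only [List.all_cons, List.all_nil, Bool.and_true, Bool.and_eq_true, List.all_eq_true]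
    exact ⟨ha0, ha1, ha2⟩

lemma pvB_iff (text : String) : is_inchikey_py_alt text = true ↔ pvGood text.toList := by
  set cs := text.toList with hcs
  unfold is_inchikey_py_alt
  simp only [← hcs]
  by_cases hlen : cs.length = 27
  · rw [if_neg (by simp [hlen])]
    have e14 : PySem.List.pyGet? cs 14 = cs[14]? := by simp [pysem]
    have e25 : PySem.List.pyGet? cs 25 = cs[25]? := by simp [pysem]
    rw [e14, e25]
    have g14 : cs[14]? = some (cs.getD 14 ' ') := by
      rw [List.getD_eq_getElem cs ' ' (by omega), List.getElem?_eq_getElem (by omega)]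
    have g25 : cs[25]? = some (cs.getD 25 ' ') := by
      rw [List.getD_eq_getElem cs ' ' (by omega), List.getElem?_eq_getElem (by omega)]
    by_cases hd : cs.getD 14 ' ' = '-' ∧ cs.getD 25 ' ' = '-'
    · rw [if_neg (by rw [g14, g25]; simp only [not_not, Option.some_inj]; exact hd)]
      constructor
      · intro hall
        refine ⟨hlen, hd.1, hd.2, ?_⟩
        intro i hi hi14 hi25
        have hmem : (i : Int) ∈ (PySem.List.pyRange 0 27 1).filter (fun j => j ≠ 14 ∧ j ≠ 25) := by
          rw [List.mem_filter]
          refine ⟨PySem.List.mem_pyRange_one.mpr ⟨by omega, by exact_mod_cast hi⟩, ?_⟩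
          simp only [decide_eq_true_eq, ne_eq]
          constructor
          · intro hh; exact hi14 (by exact_mod_cast hh)
          · intro hh; exact hi25 (by exact_mod_cast hh)
        have := List.all_eq_true.mp hall _ hmem
        rwa [PySem.List.pyGetD_natCast] at this
      · intro hg
        rw [List.all_eq_true]
        intro i hmem
        rw [List.mem_filter] at hmem
        obtain ⟨hmem, hP⟩ := hmem
        rw [PySem.List.mem_pyRange_one] at hmem
        simp only [decide_eq_true_eq, ne_eq] at hP
        have hi : i = ((i.toNat : Nat) : Int) := by omega
        rw [hi, PySem.List.pyGetD_natCast]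
        exact hg.2.2.2 i.toNat (by omega) (by omega) (by omega)
    · rw [if_pos (by rw [g14, g25]; simpa using hd)]
      simp only [Bool.false_eq_true, false_iff]
      intro hg
      exact hd ⟨hg.2.1, hg.2.2.1⟩
  · rw [if_pos (by simp [hlen])]
    simp [pvGood, hlen]

-- ===== VERDICT (by name: the statement is the Claim_ definition above) =====
theorem is_inchikey_py_spec : Claim_equal_is_inchikey_py := by
  intro text _
  unfold Spec_is_inchikey_py
  rw [Bool.eq_iff_iff, pvA_iff, pvB_iff]
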